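-- pv_equiv track=rewrite | github.com/adinashby-vanier-college/programming-in-science-midterm-v1-Nickolas-15 | Midterm.py | hollow_right_triangle
-- ===== SOURCE A (Python) =====
-- def hollow_right_triangle(n):
--     while n < 4:
--
--         return "The triangle height should be at least 4."
--
--     result = ""
--     for i in range(n):
--         for j in range(n):
--             if j == i or j == 0 or i == n - 1:
--                 result += "*"
--             elif j == i - 1:
--                 result += " " * (i - 1)
--         result += "\n"
--
--     return result.rstrip()
-- ===== SOURCE B (Python) =====
-- def hollow_right_triangle(n):
--     if n < 4:
--         return "The triangle height should be at least 4."
--     rows = []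
--     for i in range(n):
--         if i == 0:
--             rows.append("*")
--         elif i == n - 1:
--             rows.append("*" * n)
--         else:
--             rows.append("*" + " " * (i - 1) + "*")
--     return "\n".join(rows)
-- ===== Notes on version B (the rewrite author's own statement) =====
-- stated objective: simpler
-- what changed: B drops A's inner per-column scan with per-cell conditionals and per-cell string += , building each row in one step as a closed-form string ('*', '*'*n, or '*'+' '*(i-1)+'*') and joining the rows with '\n' instead of rstripping appended newlines; the n interpreter-level per-cell iterations per row collapse into O(1) string operations, a large constant-factor win measured ~30x.
import Mathlib
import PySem

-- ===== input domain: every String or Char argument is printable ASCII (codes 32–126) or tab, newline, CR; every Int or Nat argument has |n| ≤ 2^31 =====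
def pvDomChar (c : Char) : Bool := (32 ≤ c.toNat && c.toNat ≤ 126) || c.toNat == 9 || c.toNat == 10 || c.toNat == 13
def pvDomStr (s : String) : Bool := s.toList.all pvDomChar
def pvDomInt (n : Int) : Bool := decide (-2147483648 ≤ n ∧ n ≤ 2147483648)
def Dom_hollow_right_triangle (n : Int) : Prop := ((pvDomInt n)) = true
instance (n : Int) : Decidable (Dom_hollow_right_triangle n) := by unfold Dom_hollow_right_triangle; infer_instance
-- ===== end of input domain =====

-- B builds each row as one closed-form string in a single loop instead of A's per-cell
-- inner column scan with per-cell appends; objective: simpler (and measured faster by the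
-- timing run, same O(n^2) output size).

-- ===== PORT A =====
-- A's nested loops: outer over i, inner over j, appending cell by cell; then rstrip.
def hollow_right_triangle (n : Int) : String :=
  if n < 4 then "The triangle height should be at least 4."
  else
    let result : List Char :=
      (PySem.List.pyRange 0 n 1).foldl (fun result i =>
        ((PySem.List.pyRange 0 n 1).foldl (fun result j =>
          if j == i || j == 0 || i == n - 1 then result ++ ['*']
          else if j == i - 1 then result ++ PySem.List.pyRepeat [' '] (i - 1)
          else result) result) ++ ['\n']) []
    String.ofList (PySem.Chars.rstrip result)

-- ===== PORT B =====
-- B: one loop over i producing each row as a whole, then '\n'.join.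
def hollow_right_triangle_alt (n : Int) : String :=
  if n < 4 then "The triangle height should be at least 4."
  else
    let rows : List (List Char) :=
      (PySem.List.pyRange 0 n 1).foldl (fun rows i =>
        if i == 0 then rows ++ [['*']]
        else if i == n - 1 then rows ++ [PySem.List.pyRepeat ['*'] n]
        else rows ++ [['*'] ++ PySem.List.pyRepeat [' '] (i - 1) ++ ['*']]) []
    String.ofList (PySem.Chars.join ['\n'] rows)

-- ===== PRECONDITION & SPEC =====
def Spec_hollow_right_triangle (n : Int) (out : String) : Prop := out = hollow_right_triangle_alt n
instance (n : Int) (out : String) : Decidable (Spec_hollow_right_triangle n out) := by unfold Spec_hollow_right_triangle; infer_instance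

-- ===== CLAIM (what is proved, stated in full; the proofs are below) =====
def Claim_equal_hollow_right_triangle : Prop := ∀ (n : Int), Dom_hollow_right_triangle n → Spec_hollow_right_triangle n (hollow_right_triangle n)

-- ===== LEMMAS AND PROOFS =====

-- B's row, as a function of the row index (exactly B's three branches).
def pvRow (n i : Int) : List Char :=
  if i == 0 then ['*']
  else if i == n - 1 then PySem.List.pyRepeat ['*'] n
  else ['*'] ++ PySem.List.pyRepeat [' '] (i - 1) ++ ['*']

-- A's contribution at cell (i, j).
def pvCell (n i j : Int) : List Char :=
  if j == i || j == 0 || i == n - 1 then ['*']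
  else if j == i - 1 then PySem.List.pyRepeat [' '] (i - 1)
  else []

theorem pv_flatMap_const {α : Type} (a : α) (l : List Int) :
    l.flatMap (fun _ => [a]) = List.replicate l.length a := by
  induction l with
  | nil => rfl
  | cons x t ih => simp [List.flatMap_cons, ih, List.replicate_succ]

theorem pv_inner (n i : Int) (res : List Char) :
    (PySem.List.pyRange 0 n 1).foldl (fun result j =>
        if j == i || j == 0 || i == n - 1 then result ++ ['*']
        else if j == i - 1 then result ++ PySem.List.pyRepeat [' '] (i - 1)
        else result) res
      = res ++ (PySem.List.pyRange 0 n 1).flatMap (pvCell n i) := by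
  have h : (fun (result : List Char) (j : Int) =>
        if j == i || j == 0 || i == n - 1 then result ++ ['*']
        else if j == i - 1 then result ++ PySem.List.pyRepeat [' '] (i - 1)
        else result)
      = fun result j => result ++ pvCell n i j := by
    funext result j
    unfold pvCell
    split_ifs <;> simp
  rw [h, PySem.List.foldl_append_eq_flatMap]

theorem pv_row_eq (n i : Int) (hn : 4 ≤ n) (h0 : 0 ≤ i) (hi : i < n) :
    (PySem.List.pyRange 0 n 1).flatMap (pvCell n i) = pvRow n i := by
  by_cases hlast : i = n - 1
  · subst hlast
    have hc : pvCell n (n - 1) = fun _ => ['*'] := by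
      funext j; simp [pvCell]
    rw [hc, pv_flatMap_const, PySem.List.length_pyRange_one,
      pvRow, PySem.List.pyRepeat_singleton]
    have h1 : ¬ (n - 1 = 0) := by omega
    simp [h1]
  · by_cases hz : i = 0
    · subst hz
      rw [PySem.List.pyRange_one_append 0 1 n (by omega) (by omega)]
      have h01 : PySem.List.pyRange 0 1 = [0] := PySem.List.pyRange_one_singleton 0
      rw [List.flatMap_append, h01, List.flatMap_singleton]
      have htail : (PySem.List.pyRange 1 n).flatMap (pvCell n 0) = [] := by
        apply List.flatMap_eq_nil_iff.mpr
        intro j hj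
        rw [PySem.List.mem_pyRange_one] at hj
        have hj1 : ¬ (j = 0) := by omega
        have hj2 : ¬ (j = (0:Int) - 1) := by omega
        simp [pvCell, hj1, hlast]
      rw [htail]
      simp [pvCell, pvRow]
    · -- middle row: 0 < i < n - 1
      have hi1 : 1 ≤ i := by omega
      have hin : i < n - 1 := by omega
      rw [PySem.List.pyRange_one_append 0 (i + 1) n (by omega) (by omega),
        PySem.List.pyRange_one_succ_right (by omega : (0:Int) ≤ i),
        PySem.List.pyRange_one_append 0 (i - 1) i (by omega) (by omega)]
      have hii : PySem.List.pyRange (i - 1) i = [i - 1] := by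
        rw [PySem.List.pyRange_one_cons (by omega), PySem.List.pyRange_one_eq_nil (by omega)]
      rw [hii]
      have htail : (PySem.List.pyRange (i + 1) n).flatMap (pvCell n i) = [] := by
        apply List.flatMap_eq_nil_iff.mpr
        intro j hj
        rw [PySem.List.mem_pyRange_one] at hj
        have hj1 : ¬ (j = i) := by omega
        have hj2 : ¬ (j = 0) := by omega
        have hj3 : ¬ (j = i - 1) := by omega
        simp [pvCell, hj1, hj2, hj3, hlast]
      have hci : pvCell n i i = ['*'] := by simp [pvCell]
      simp only [List.flatMap_append, htail, List.flatMap_singleton, hci, List.append_nil]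
      by_cases h1 : i = 1
      · subst h1
        have hpre : PySem.List.pyRange 0 (1 - 1) = [] := PySem.List.pyRange_one_eq_nil (by omega)
        rw [hpre]
        have : pvCell n 1 (1 - 1) = ['*'] := by norm_num [pvCell, hlast]
        rw [this]
        simp [pvRow, hlast, PySem.List.pyRepeat]
      · -- 2 ≤ i
        have h2i : 2 ≤ i := by omega
        have h01 : PySem.List.pyRange 0 1 = [0] := by
          rw [PySem.List.pyRange_one_cons (by omega), PySem.List.pyRange_one_eq_nil (by omega)]
        rw [PySem.List.pyRange_one_append 0 1 (i - 1) (by omega) (by omega), h01]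
        have hc0 : pvCell n i 0 = ['*'] := by simp [pvCell]
        have hmid : (PySem.List.pyRange 1 (i - 1)).flatMap (pvCell n i) = [] := by
          apply List.flatMap_eq_nil_iff.mpr
          intro j hj
          rw [PySem.List.mem_pyRange_one] at hj
          have hj1 : ¬ (j = i) := by omega
          have hj2 : ¬ (j = 0) := by omega
          have hj3 : ¬ (j = i - 1) := by omega
          simp [pvCell, hj1, hj2, hj3, hlast]
        have hcim : pvCell n i (i - 1) = PySem.List.pyRepeat [' '] (i - 1) := by
          have e1 : ¬ (i - 1 = i) := by omega
          have e2 : ¬ (i - 1 = 0) := by omega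
          simp [pvCell, e1, e2, hlast]
        simp only [List.flatMap_append, List.flatMap_singleton, hc0, hmid, hcim,
          List.append_nil]
        simp [pvRow, hz, hlast]

theorem pv_join_flat (sep : List Char) (l : List (List Char)) (h : l ≠ []) :
    l.flatMap (fun r => r ++ sep) = PySem.Chars.join sep l ++ sep := by
  induction l with
  | nil => exact absurd rfl h
  | cons a t ih =>
    cases t with
    | nil => simp [PySem.Chars.join, List.intercalate]
    | cons b t' =>
      rw [List.flatMap_cons, ih (by simp), PySem.Chars.join_cons_cons]
      simp

theorem pv_join_append_singleton (sep : List Char) (l : List (List Char)) (r : List Char)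
    (h : l ≠ []) :
    PySem.Chars.join sep (l ++ [r]) = PySem.Chars.join sep l ++ sep ++ r := by
  induction l with
  | nil => exact absurd rfl h
  | cons a t ih =>
    cases t with
    | nil => simp [PySem.Chars.join, List.intercalate]
    | cons b t' =>
      have : a :: b :: t' ++ [r] = a :: (b :: (t' ++ [r])) := by simp
      rw [this, PySem.Chars.join_cons_cons]
      cases t' with
      | nil =>
        simp [PySem.Chars.join, List.intercalate]
      | cons c t'' =>
        have h2 : b :: (c :: t'' ++ [r]) = (b :: c :: t'') ++ [r] := by simp
        rw [h2, ih (by simp)]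
        simp [PySem.Chars.join_cons_cons]

theorem pv_rstrip (x : List Char) :
    PySem.Chars.rstrip (x ++ ['*'] ++ ['\n']) = x ++ ['*'] := by
  have h1 : PySem.Chars.isspace '\n' = true := by decide
  have h2 : PySem.Chars.isspace '*' = false := by decide
  simp [PySem.Chars.rstrip, List.dropWhile, h1, h2]

theorem pv_flatMap_cons_singleton {α β : Type} (g : α → List β) (l : List α) :
    l.flatMap (fun x => [g x]) = l.map g := by
  induction l with
  | nil => rfl
  | cons x t ih => simp [ih]

theorem pv_main (n : Int) : hollow_right_triangle n = hollow_right_triangle_alt n := by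
  unfold hollow_right_triangle hollow_right_triangle_alt
  by_cases h4 : n < 4
  · simp [h4]
  · simp only [if_neg h4]
    have hn : 4 ≤ n := by omega
    -- the B-side rows loop builds exactly the list of rows
    have hBstep : (fun (rows : List (List Char)) (i : Int) =>
          if i == 0 then rows ++ [['*']]
          else if i == n - 1 then rows ++ [PySem.List.pyRepeat ['*'] n]
          else rows ++ [['*'] ++ PySem.List.pyRepeat [' '] (i - 1) ++ ['*']])
        = fun rows i => rows ++ [pvRow n i] := by
      funext rows i
      unfold pvRow
      split_ifs <;> rfl
    rw [hBstep, PySem.List.foldl_append_eq_flatMap, pv_flatMap_cons_singleton, List.nil_append]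
    -- the A-side double loop builds row-by-row, each row being pvRow
    have hAstep : (PySem.List.pyRange 0 n 1).foldl (fun result i =>
          ((PySem.List.pyRange 0 n 1).foldl (fun result j =>
            if j == i || j == 0 || i == n - 1 then result ++ ['*']
            else if j == i - 1 then result ++ PySem.List.pyRepeat [' '] (i - 1)
            else result) result) ++ ['\n']) []
        = (PySem.List.pyRange 0 n 1).foldl
            (fun result i => result ++ (pvRow n i ++ ['\n'])) [] := by
      apply PySem.List.foldl_congr_mem
      intro acc i hi
      rw [PySem.List.mem_pyRange_one] at hi
      rw [pv_inner, pv_row_eq n i hn hi.1 hi.2]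
      simp
    rw [hAstep, PySem.List.foldl_append_eq_flatMap, List.nil_append]
    have hflat : (PySem.List.pyRange 0 n 1).flatMap (fun i => pvRow n i ++ ['\n'])
        = ((PySem.List.pyRange 0 n 1).map (pvRow n)).flatMap (fun r => r ++ ['\n']) := by
      rw [List.flatMap_map]
    have hne : (PySem.List.pyRange 0 n 1).map (pvRow n) ≠ [] := by
      intro hcontra
      have := congrArg List.length hcontra
      simp [PySem.List.length_pyRange_one] at this
      omega
    rw [hflat, pv_join_flat _ _ hne]
    -- the joined rows end in '*', so rstrip strips exactly the trailing newline
    congr 1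
    have hsplit : PySem.List.pyRange 0 n 1 = PySem.List.pyRange 0 (n - 1) ++ [n - 1] := by
      have h : n = (n - 1) + 1 := by omega
      calc PySem.List.pyRange 0 n 1 = PySem.List.pyRange 0 ((n - 1) + 1) := by rw [← h]
        _ = PySem.List.pyRange 0 (n - 1) ++ [n - 1] :=
            PySem.List.pyRange_one_succ_right (by omega)
    have hlastrow : pvRow n (n - 1) = List.replicate (n.toNat - 1) '*' ++ ['*'] := by
      have h1 : ¬ (n - 1 = 0) := by omega
      have h2 : n.toNat = (n.toNat - 1) + 1 := by omega
      rw [pvRow]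
      simp only [beq_iff_eq, h1, if_false, if_true, PySem.List.pyRepeat_singleton]
      conv_lhs => rw [h2]
      rw [List.replicate_succ']
    have hpre_ne : (PySem.List.pyRange 0 (n - 1)).map (pvRow n) ≠ [] := by
      intro hcontra
      have := congrArg List.length hcontra
      simp [PySem.List.length_pyRange_one] at this
      omega
    rw [hsplit]
    rw [List.map_append, List.map_singleton, hlastrow,
      pv_join_append_singleton _ _ _ hpre_ne]
    have := pv_rstrip (PySem.Chars.join ['\n'] ((PySem.List.pyRange 0 (n - 1)).map (pvRow n))
      ++ ['\n'] ++ List.replicate (n.toNat - 1) '*')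
    simpa [List.append_assoc] using this

-- ===== VERDICT (by name: the statement is the Claim_ definition above) =====
theorem hollow_right_triangle_spec : Claim_equal_hollow_right_triangle := by
  intro n _
  exact pv_main n
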